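-- pv_equiv track=rewrite | github.com/DewPeaceTigers/AlgorithmStudy | weeks/week_32/PG_12938/jeongmin.py | solution
-- ===== SOURCE A (Python) =====
-- def solution(n, s):
--     if n > s:
--         return [-1]
--
--     p, q = divmod(s, n)
--     answer = [p] * n
--
--     # 나머지 q: 뒤에서부터 q개 +1씩 더해줌
--     for i in range(q):
--         answer[n-1-i] += 1
--
--     return answer
-- ===== SOURCE B (Python) =====
-- def solution(n, s):
--     if n > s:
--         return [-1]
--     # each slot computed independently by a closed form: slot i gets (s + i) // n,
--     # which is s//n for the first n - s%n slots and s//n + 1 for the last s%n slots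
--     return [(s + i) // n for i in range(n)]
-- ===== Notes on version B (the rewrite author's own statement) =====
-- stated objective: idiomatic
-- what changed: B replaces the divmod-then-distribute strategy (build [p]*n, loop adding +1 to the last q slots) with a single comprehension computing each slot independently by the closed form (s+i)//n.
import Mathlib
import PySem

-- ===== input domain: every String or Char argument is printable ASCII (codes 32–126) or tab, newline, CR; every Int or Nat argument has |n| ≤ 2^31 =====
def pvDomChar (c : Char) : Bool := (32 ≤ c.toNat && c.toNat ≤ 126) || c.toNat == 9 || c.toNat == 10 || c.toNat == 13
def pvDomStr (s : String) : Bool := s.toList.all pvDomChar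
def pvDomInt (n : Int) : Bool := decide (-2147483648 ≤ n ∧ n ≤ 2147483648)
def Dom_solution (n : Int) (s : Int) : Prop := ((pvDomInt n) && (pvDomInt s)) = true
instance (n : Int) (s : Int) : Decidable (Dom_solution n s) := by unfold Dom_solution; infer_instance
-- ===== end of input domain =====

-- B computes each slot independently by the closed form (s+i)//n instead of
-- A's divmod-then-distribute loop; objective: idiomatic (same cost).


-- ===== PORT A =====
-- answer[n-1-i] += 1 is ported with the total pyGetD/pySetD; under Pre_ the index
-- n-1-i is always in range (0 ≤ i < q < n), so this is exact.
def solution (n : Int) (s : Int) : List Int :=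
  if n > s then [-1]
  else
    let p := PySem.Int.floordiv s n
    let q := PySem.Int.mod s n
    let answer := PySem.List.pyRepeat [p] n
    (PySem.List.pyRange 0 q 1).foldl
      (fun ans i =>
        PySem.List.pySetD ans (n - 1 - i) (PySem.List.pyGetD ans (n - 1 - i) 0 + 1))
      answer

-- ===== PORT B =====
def solution_alt (n : Int) (s : Int) : List Int :=
  if n > s then [-1]
  else (PySem.List.pyRange 0 n 1).map (fun i => PySem.Int.floordiv (s + i) n)

-- ===== PRECONDITION & SPEC =====
-- Pre_ excludes exactly n = 0 ∧ 0 ≤ s, where A reaches divmod(s, 0) and raises ZeroDivisionError.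
def Pre_solution (n : Int) (s : Int) : Prop := n ≠ 0 ∨ s < 0
instance (n : Int) (s : Int) : Decidable (Pre_solution n s) := by unfold Pre_solution; infer_instance
def pvWitness_solution : Int × Int := (3, 7)

def Spec_solution (n : Int) (s : Int) (out : List Int) : Prop := out = solution_alt n s
instance (n : Int) (s : Int) (out : List Int) : Decidable (Spec_solution n s out) := by unfold Spec_solution; infer_instance

-- ===== CLAIM (what is proved, stated in full; the proofs are below) =====
def Claim_equal_solution : Prop := ∀ (n : Int) (s : Int), Dom_solution n s → Pre_solution n s → Spec_solution n s (solution n s)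

-- ===== LEMMAS AND PROOFS =====

-- A's distribution loop, after k of the q steps, as a map over indices.
lemma solution_fold_inv (n p : Int) (hn : 0 < n) (k : Nat) (hk : (k : Int) ≤ n) :
    (PySem.List.pyRange 0 (k : Int) 1).foldl
      (fun ans i =>
        PySem.List.pySetD ans (n - 1 - i) (PySem.List.pyGetD ans (n - 1 - i) 0 + 1))
      (List.replicate n.toNat p)
    = (List.range n.toNat).map (fun j => if n.toNat ≤ j + k then p + 1 else p) := by
  induction k with
  | zero =>
      rw [Nat.cast_zero, PySem.List.pyRange_one_eq_nil le_rfl]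
      simp only [List.foldl_nil]
      apply List.ext_getElem
      · simp
      · intro j h1 h2
        simp only [List.getElem_replicate, List.getElem_map, List.getElem_range]
        have hj : j < n.toNat := by simpa using h1
        rw [if_neg (by omega)]
  | succ k ih =>
      have hk' : (k : Int) ≤ n := by push_cast at hk ⊢; omega
      have hstep : PySem.List.pyRange 0 ((k : Int) + 1) 1
          = PySem.List.pyRange 0 (k : Int) 1 ++ [(k : Int)] := by
        exact PySem.List.pyRange_one_succ_right (by positivity)
      rw [show ((k + 1 : Nat) : Int) = (k : Int) + 1 by push_cast; ring, hstep,
        List.foldl_append, ih hk']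
      simp only [List.foldl_cons, List.foldl_nil]
      have hkn : k < n.toNat := by omega
      have hidx : (n - 1 - (k : Int)) = ((n.toNat - 1 - k : Nat) : Int) := by omega
      rw [hidx, PySem.List.pySetD_natCast]
      have hlen : ((List.range n.toNat).map
          (fun j => if n.toNat ≤ j + k then p + 1 else p)).length = n.toNat := by simp
      have hget : PySem.List.pyGetD
          ((List.range n.toNat).map (fun j => if n.toNat ≤ j + k then p + 1 else p))
          ((n.toNat - 1 - k : Nat) : Int) 0 = p := by
        rw [PySem.List.pyGetD_of_nonneg _ _ (by omega)]
        simp only [Int.toNat_natCast]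
        rw [List.getD_eq_getElem?_getD, List.getElem?_map, List.getElem?_range (by omega)]
        simp only [Option.map_some, Option.getD_some]
        rw [if_neg (by omega)]
      rw [hget]
      apply List.ext_getElem
      · simp
      · intro j h1 h2
        have hj2 : j < n.toNat := by simpa using h2
        simp only [List.getElem_set, List.getElem_map, List.getElem_range]
        split_ifs <;> omega

-- the closed form agrees slot-wise with base value + carry
lemma closed_form_slot (n s : Int) (hn : 0 < n) (j : Nat) (hj : j < n.toNat) :
    PySem.Int.floordiv (s + (0 + (j : Int))) n
    = (if n.toNat ≤ j + (PySem.Int.mod s n).toNat then PySem.Int.floordiv s n + 1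
       else PySem.Int.floordiv s n) := by
  have hq0 := PySem.Int.mod_nonneg s hn
  have hqn := PySem.Int.mod_lt s hn
  have hsum := PySem.Int.floordiv_mul_add_mod s n
  have hcast := Int.toNat_of_nonneg hq0
  have hjn : (j : Int) < n := by omega
  have e1 : (PySem.Int.floordiv s n + 1) * n = PySem.Int.floordiv s n * n + n := by ring
  have e2 : (PySem.Int.floordiv s n + 1 + 1) * n = PySem.Int.floordiv s n * n + n + n := by ring
  rw [PySem.Int.floordiv_eq_iff_of_pos hn]
  split_ifs with h
  · have hge : n ≤ (j : Int) + PySem.Int.mod s n := by omega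
    rw [e1, e2]
    constructor <;> linarith
  · have hlt : (j : Int) + PySem.Int.mod s n < n := by omega
    rw [e1]
    constructor <;> linarith

-- ===== VERDICT (by name: the statement is the Claim_ definition above) =====
theorem solution_spec : Claim_equal_solution := by
  intro n s _ hpre
  unfold Spec_solution solution solution_alt
  by_cases hns : n > s
  · simp [hns]
  · simp only [if_neg hns]
    have hle : n ≤ s := by omega
    rcases lt_trichotomy n 0 with hn | hn | hn
    · -- n < 0 : both sides are []
      have hq := (PySem.Int.mod_neg_bounds s hn).2
      rw [PySem.List.pyRange_one_eq_nil hq, PySem.List.pyRange_one_eq_nil hn.le]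
      rw [PySem.List.pyRepeat_singleton]
      simp [Int.toNat_of_nonpos hn.le]
    · exact absurd hn (by unfold Pre_solution at hpre; omega)
    · -- n > 0
      have hq0 := PySem.Int.mod_nonneg s hn
      have hqn := PySem.Int.mod_lt s hn
      have hqcast : PySem.Int.mod s n = ((PySem.Int.mod s n).toNat : Int) :=
        (Int.toNat_of_nonneg hq0).symm
      rw [PySem.List.pyRepeat_singleton]
      rw [hqcast, solution_fold_inv n _ hn _ (by omega)]
      rw [PySem.List.pyRange_one 0 n]
      simp only [List.map_map, sub_zero]
      apply List.map_congr_left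
      intro j hj
      rw [List.mem_range] at hj
      simp only [Function.comp]
      exact (closed_form_slot n s hn j hj).symm
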